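-- pv_equiv track=rewrite | github.com/OpenCPLC/Forge | opencplc/utils/text.py | line_replace
-- ===== SOURCE A (Python) =====
-- def line_replace(text:str, phrase:str, new:str, limit:int=1) -> str:
--   """Replace lines containing phrase, preserving indent."""
--   lines = text.splitlines()
--   out, count = [], 0
--   for ln in lines:
--     if phrase in ln and count < limit:
--       indent = len(ln) - len(ln.lstrip())
--       out.append(" " * indent + new)
--       count += 1
--     else:
--       out.append(ln)
--   return "\n".join(out)
-- ===== SOURCE B (Python) =====
-- def line_replace(text: str, phrase: str, new: str, limit: int = 1) -> str:
--   """Replace lines containing phrase, preserving indent (two-pass: collect hit indices, then rebuild)."""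
--   lines = text.splitlines()
--   hits = set()
--   for i, ln in enumerate(lines):
--     if len(hits) >= limit:
--       break
--     if phrase in ln:
--       hits.add(i)
--   out = []
--   for i, ln in enumerate(lines):
--     if i in hits:
--       out.append(" " * (len(ln) - len(ln.lstrip())) + new)
--     else:
--       out.append(ln)
--   return "\n".join(out)
-- ===== Notes on version B (the rewrite author's own statement) =====
-- stated objective: alternative
-- what changed: Replaces A's single stateful count-guarded pass with two passes: first collect (capped at limit) the set of indices of lines containing the phrase, then rebuild the output by index-membership in that set.
import Mathlib
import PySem

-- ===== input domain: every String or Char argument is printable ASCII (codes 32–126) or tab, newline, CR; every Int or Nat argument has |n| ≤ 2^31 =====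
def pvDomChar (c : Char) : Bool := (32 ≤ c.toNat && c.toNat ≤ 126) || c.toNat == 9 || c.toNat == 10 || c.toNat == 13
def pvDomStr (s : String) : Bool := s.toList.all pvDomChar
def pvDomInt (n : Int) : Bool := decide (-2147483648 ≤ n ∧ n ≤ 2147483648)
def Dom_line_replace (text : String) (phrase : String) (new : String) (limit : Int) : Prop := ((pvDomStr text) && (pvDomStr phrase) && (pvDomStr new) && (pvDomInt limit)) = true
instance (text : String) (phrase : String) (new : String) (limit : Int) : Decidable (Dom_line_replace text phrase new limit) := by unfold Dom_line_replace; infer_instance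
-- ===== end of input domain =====

-- B replaces A's single stateful count-guarded pass by two passes (collect hit indices into a set, then rebuild by index membership); alternative decomposition, same cost.

-- ===== PORT A =====
def line_replace (text : String) (phrase : String) (new : String) (limit : Int) : String :=
  String.ofList (PySem.Chars.join ['
']
    ((PySem.Chars.splitlines text.toList).foldl (fun (st : List (List Char) × Int) ln =>
      if PySem.Chars.isIn phrase.toList ln && decide (st.2 < limit) then
        (st.1 ++ [List.replicate (ln.length - (PySem.Chars.lstrip ln).length) ' ' ++ new.toList], st.2 + 1)
      else (st.1 ++ [ln], st.2)) ([], 0)).1)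

-- ===== PORT B =====
-- first pass of Source B: walk the enumerated lines, stop at limit hits, collect indices
def lrCollect (phrase : List Char) (limit : Int) : List (Int × List Char) → PySem.Set Int → PySem.Set Int
  | [], hits => hits
  | (i, ln) :: rest, hits =>
    if decide (limit ≤ (PySem.Set.len hits : Int)) then hits
    else if PySem.Chars.isIn phrase ln then lrCollect phrase limit rest (PySem.Set.add hits i)
    else lrCollect phrase limit rest hits

def line_replace_alt (text : String) (phrase : String) (new : String) (limit : Int) : String :=
  String.ofList (PySem.Chars.join ['
']
    ((PySem.List.enumerate (PySem.Chars.splitlines text.toList) 0).map (fun p =>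
      if PySem.Set.contains
          (lrCollect phrase.toList limit
            (PySem.List.enumerate (PySem.Chars.splitlines text.toList) 0) PySem.Set.empty) p.1 then
        List.replicate (p.2.length - (PySem.Chars.lstrip p.2).length) ' ' ++ new.toList
      else p.2)))

-- ===== PRECONDITION & SPEC =====
def Spec_line_replace (text : String) (phrase : String) (new : String) (limit : Int) (out : String) : Prop := out = line_replace_alt text phrase new limit
instance (text : String) (phrase : String) (new : String) (limit : Int) (out : String) : Decidable (Spec_line_replace text phrase new limit out) := by unfold Spec_line_replace; infer_instance

-- ===== CLAIM (what is proved, stated in full; the proofs are below) =====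
def Claim_equal_line_replace : Prop := ∀ (text : String) (phrase : String) (new : String) (limit : Int), Dom_line_replace text phrase new limit → Spec_line_replace text phrase new limit (line_replace text phrase new limit)

-- ===== LEMMAS AND PROOFS =====

-- common reference: the replaced-lines list, driven by the running count (A's loop body, output only)
def lrGo (phrase new : List Char) (limit : Int) : List (List Char) → Int → List (List Char)
  | [], _ => []
  | ln :: rest, c =>
    if PySem.Chars.isIn phrase ln && decide (c < limit) then
      (List.replicate (ln.length - (PySem.Chars.lstrip ln).length) ' ' ++ new) :: lrGo phrase new limit rest (c + 1)
    else ln :: lrGo phrase new limit rest c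

lemma lrA_fold (phrase new : List Char) (limit : Int) :
    ∀ (lines : List (List Char)) (acc : List (List Char)) (c : Int),
    (lines.foldl (fun (st : List (List Char) × Int) ln =>
      if PySem.Chars.isIn phrase ln && decide (st.2 < limit) then
        (st.1 ++ [List.replicate (ln.length - (PySem.Chars.lstrip ln).length) ' ' ++ new], st.2 + 1)
      else (st.1 ++ [ln], st.2)) (acc, c)).1 = acc ++ lrGo phrase new limit lines c := by
  intro lines
  induction lines with
  | nil => intro acc c; simp [lrGo]
  | cons ln rest ih =>
    intro acc c
    by_cases h : (PySem.Chars.isIn phrase ln && decide (c < limit)) = true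
    · rw [List.foldl_cons]
      simp only [if_pos h, ih, lrGo, List.append_assoc, List.singleton_append]
    · have h' : (PySem.Chars.isIn phrase ln && decide (c < limit)) = false := by
        simpa using h
      rw [List.foldl_cons]
      simp only [h', if_neg (by simp : ¬ (false = true)), ih, lrGo,
        List.append_assoc, List.singleton_append]

lemma lrCollect_stop (phrase : List Char) (limit : Int) (xs : List (Int × List Char))
    (h : PySem.Set Int) (hl : limit ≤ (PySem.Set.len h : Int)) :
    lrCollect phrase limit xs h = h := by
  cases xs with
  | nil => rfl
  | cons p rest =>
    cases p
    simp only [lrCollect, decide_eq_true_eq]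
    rw [if_pos hl]

lemma mem_lrCollect (phrase : List Char) (limit : Int) :
    ∀ (xs : List (Int × List Char)) (h : PySem.Set Int) (i : Int),
    i ∈ lrCollect phrase limit xs h → i ∈ h ∨ i ∈ xs.map (·.1) := by
  intro xs
  induction xs with
  | nil => intro h i hi; exact Or.inl hi
  | cons p rest ih =>
    intro h i hi
    cases p with
    | mk j ln =>
      simp only [lrCollect] at hi
      split at hi
      · exact Or.inl hi
      · split at hi
        · rcases ih _ _ hi with hm | hm
          · rcases (PySem.Set.mem_add _ _ _).1 hm with hm' | hm'
            · exact Or.inl hm'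
            · right; simp [hm']
          · right; simp [hm]
        · rcases ih _ _ hi with hm | hm
          · exact Or.inl hm
          · right; simp [hm]

lemma subset_lrCollect (phrase : List Char) (limit : Int) :
    ∀ (xs : List (Int × List Char)) (h : PySem.Set Int) (i : Int),
    i ∈ h → i ∈ lrCollect phrase limit xs h := by
  intro xs
  induction xs with
  | nil => intro h i hi; exact hi
  | cons p rest ih =>
    intro h i hi
    cases p with
    | mk j ln =>
      simp only [lrCollect]
      split
      · exact hi
      · split
        · exact ih _ _ ((PySem.Set.mem_add _ _ _).2 (Or.inl hi))
        · exact ih _ _ hi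

lemma mem_fst_enumerate (i : Int) :
    ∀ (xs : List (List Char)) (s : Int), i ∈ (PySem.List.enumerate xs s).map (·.1) → s ≤ i := by
  intro xs
  induction xs with
  | nil => intro s hi; simp [PySem.List.enumerate_nil] at hi
  | cons x rest ih =>
    intro s hi
    rw [PySem.List.enumerate_cons] at hi
    simp only [List.map_cons, List.mem_cons] at hi
    rcases hi with hi | hi
    · omega
    · have := ih (s + 1) hi; omega

lemma lrMain (phrase new : List Char) (limit : Int) :
    ∀ (lines : List (List Char)) (s : Int) (h : PySem.Set Int) (c : Int),
    (∀ i ∈ h, i < s) → ((PySem.Set.len h : Int) = c) →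
    (PySem.List.enumerate lines s).map (fun p =>
      if PySem.Set.contains (lrCollect phrase limit (PySem.List.enumerate lines s) h) p.1 then
        List.replicate (p.2.length - (PySem.Chars.lstrip p.2).length) ' ' ++ new
      else p.2) = lrGo phrase new limit lines c := by
  intro lines
  induction lines with
  | nil => intro s h c _ _; simp [PySem.List.enumerate_nil, lrGo]
  | cons ln rest ih =>
    intro s h c hlt hlen
    rw [PySem.List.enumerate_cons]
    simp only [lrCollect, List.map_cons, decide_eq_true_eq]
    by_cases hc : c < limit
    · have hstop : ¬ (limit ≤ (PySem.Set.len h : Int)) := by omega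
      rw [if_neg hstop]
      by_cases hm : PySem.Chars.isIn phrase ln = true
      · -- matched: index s goes into the set
        have hsnot : s ∉ h := fun hs => lt_irrefl s (hlt s hs)
        have hmem : s ∈ lrCollect phrase limit (PySem.List.enumerate rest (s + 1)) (PySem.Set.add h s) :=
          subset_lrCollect phrase limit _ _ _ ((PySem.Set.mem_add _ _ _).2 (Or.inr rfl))
        have hcont : PySem.Set.contains
            (lrCollect phrase limit (PySem.List.enumerate rest (s + 1)) (PySem.Set.add h s)) s = true :=
          (PySem.Set.contains_iff _ _).2 hmem
        have hgo : (PySem.Chars.isIn phrase ln && decide (c < limit)) = true := by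
          simp [hm, hc]
        rw [if_pos hm, lrGo, if_pos hgo, if_pos hcont]
        refine congrArg _ (ih (s + 1) (PySem.Set.add h s) (c + 1) ?_ ?_)
        · intro i hi
          rcases (PySem.Set.mem_add _ _ _).1 hi with hi' | hi'
          · have := hlt i hi'; omega
          · omega
        · rw [PySem.Set.add_of_not_mem hsnot]
          simp only [PySem.Set.len, List.length_append, List.length_singleton] at *
          omega
      · -- no match: s never enters the set
        have hsnot : s ∉ lrCollect phrase limit (PySem.List.enumerate rest (s + 1)) h := by
          intro hs
          rcases mem_lrCollect phrase limit _ _ _ hs with hs' | hs'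
          · exact lt_irrefl s (hlt s hs')
          · have := mem_fst_enumerate s rest (s + 1) hs'; omega
        have hcont : ¬ PySem.Set.contains
            (lrCollect phrase limit (PySem.List.enumerate rest (s + 1)) h) s = true :=
          fun hcc => hsnot ((PySem.Set.contains_iff _ _).1 hcc)
        have hgo : ¬ ((PySem.Chars.isIn phrase ln && decide (c < limit)) = true) := by
          simp [hm]
        rw [if_neg hm, lrGo, if_neg hgo, if_neg hcont]
        refine congrArg _ (ih (s + 1) h c ?_ hlen)
        intro i hi; have := hlt i hi; omega
    · -- count reached: collection stopped, set is h forever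
      have hstop : limit ≤ (PySem.Set.len h : Int) := by omega
      rw [if_pos hstop]
      have hsnot : s ∉ h := fun hs => lt_irrefl s (hlt s hs)
      have hcont : ¬ PySem.Set.contains h s = true :=
        fun hcc => hsnot ((PySem.Set.contains_iff _ _).1 hcc)
      have hgo : ¬ ((PySem.Chars.isIn phrase ln && decide (c < limit)) = true) := by
        simp [hc]
      rw [lrGo, if_neg hgo, if_neg hcont]
      refine congrArg _ ?_
      have := ih (s + 1) h c (fun i hi => by have := hlt i hi; omega) hlen
      rw [lrCollect_stop phrase limit _ _ hstop] at this
      exact this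

-- ===== VERDICT (by name: the statement is the Claim_ definition above) =====
theorem line_replace_spec : Claim_equal_line_replace := by
  intro text phrase new limit _
  unfold Spec_line_replace line_replace line_replace_alt
  rw [lrA_fold phrase.toList new.toList limit (PySem.Chars.splitlines text.toList) [] 0,
      lrMain phrase.toList new.toList limit (PySem.Chars.splitlines text.toList) 0 PySem.Set.empty 0
        (by intro i hi; simp [PySem.Set.empty] at hi) (by rfl)]
  rfl
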